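-- pv_equiv track=rewrite | github.com/Chr1Z93/AdventOfCode2023 | Day01/solution2.py | getDigitCharFromString
-- ===== SOURCE A (Python) =====
-- def getDigitCharFromString(str, mode):
--     if mode == "first":
--         pos = -1
--         for char in str:
--             pos += 1
--             if char.isdigit():
--                 return char, pos
--     else:
--         pos = len(str)
--         for char in reversed(str):
--             pos -= 1
--             if char.isdigit():
--                 return char, pos
--     return "", -1
-- ===== SOURCE B (Python) =====
-- def getDigitCharFromString(str, mode):
--     digits = [(char, pos) for pos, char in enumerate(str) if char.isdigit()]
--     if not digits:
--         return "", -1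
--     if mode == "first":
--         return digits[0]
--     return digits[-1]
-- ===== Notes on version B (the rewrite author's own statement) =====
-- stated objective: simpler
-- what changed: Instead of two direction-specific early-exit scans (forward for 'first', reversed for the rest), B builds one index of all (digit, position) pairs in a single forward pass and returns its first or last entry.
import Mathlib
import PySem

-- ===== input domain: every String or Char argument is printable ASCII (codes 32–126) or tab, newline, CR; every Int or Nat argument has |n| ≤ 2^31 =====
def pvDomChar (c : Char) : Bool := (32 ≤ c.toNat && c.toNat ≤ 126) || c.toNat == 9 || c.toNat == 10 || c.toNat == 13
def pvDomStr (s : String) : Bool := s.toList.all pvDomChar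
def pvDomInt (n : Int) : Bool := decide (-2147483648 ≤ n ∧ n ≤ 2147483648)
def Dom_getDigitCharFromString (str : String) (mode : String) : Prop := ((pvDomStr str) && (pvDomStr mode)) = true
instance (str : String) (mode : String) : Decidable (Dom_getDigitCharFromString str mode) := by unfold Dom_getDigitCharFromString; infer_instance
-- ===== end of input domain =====

-- B replaces A's two direction-specific early-exit scans with one forward pass that
-- collects all (digit, position) pairs and indexes its first or last entry (objective: simpler).


-- ===== PORT A =====
-- forward loop: pos starts at -1, incremented before the digit test
def pvGoFwd : List Char → Int → String × Int
  | [], _ => ("", -1)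
  | c :: rest, pos =>
    let pos := pos + 1
    if PySem.Chars.isdigit c then (String.ofList [c], pos) else pvGoFwd rest pos

-- reversed loop: pos starts at len(str), decremented before the digit test
def pvGoRev : List Char → Int → String × Int
  | [], _ => ("", -1)
  | c :: rest, pos =>
    let pos := pos - 1
    if PySem.Chars.isdigit c then (String.ofList [c], pos) else pvGoRev rest pos

def getDigitCharFromString (str : String) (mode : String) : String × Int :=
  if mode == "first" then pvGoFwd str.toList (-1)
  else pvGoRev str.toList.reverse (str.toList.length : Int)

-- ===== PORT B =====
def getDigitCharFromString_alt (str : String) (mode : String) : String × Int :=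
  let digits := ((PySem.List.enumerate str.toList).filter (fun p => PySem.Chars.isdigit p.2)).map
    (fun p => (String.ofList [p.2], p.1))
  if h : digits = [] then ("", -1)
  else if mode == "first" then digits.head h
  else digits.getLast h

-- ===== PRECONDITION & SPEC =====
def Spec_getDigitCharFromString (str : String) (mode : String) (out : String × Int) : Prop := out = getDigitCharFromString_alt str mode
instance (str : String) (mode : String) (out : String × Int) : Decidable (Spec_getDigitCharFromString str mode out) := by unfold Spec_getDigitCharFromString; infer_instance

-- ===== CLAIM (what is proved, stated in full; the proofs are below) =====
def Claim_equal_getDigitCharFromString : Prop := ∀ (str : String) (mode : String), Dom_getDigitCharFromString str mode → Spec_getDigitCharFromString str mode (getDigitCharFromString str mode)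

-- ===== LEMMAS AND PROOFS =====
lemma pvGoFwd_eq (cs : List Char) : ∀ (s : Int),
    pvGoFwd cs (s - 1) =
      match (PySem.List.enumerate cs s).filter (fun p => PySem.Chars.isdigit p.2) with
      | [] => ("", -1)
      | p :: _ => (String.ofList [p.2], p.1) := by
  induction cs with
  | nil => intro s; simp [pvGoFwd, PySem.List.enumerate_nil]
  | cons c rest ih =>
    intro s
    simp only [pvGoFwd, PySem.List.enumerate_cons, List.filter_cons]
    by_cases h : PySem.Chars.isdigit c
    · simp [h]
    · have := ih (s + 1)
      simpa [h, show s - 1 + 1 = s + 1 - 1 by omega] using this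

lemma pvGoRev_eq (cs : List Char) : ∀ (s : Int),
    pvGoRev cs.reverse (s + cs.length) =
      match ((PySem.List.enumerate cs s).filter (fun p => PySem.Chars.isdigit p.2)).getLast? with
      | none => ("", -1)
      | some p => (String.ofList [p.2], p.1) := by
  induction cs using List.reverseRecOn with
  | nil => intro s; simp [pvGoRev, PySem.List.enumerate_nil]
  | append_singleton ds c ih =>
    intro s
    rw [List.reverse_append]
    simp only [List.reverse_singleton, List.singleton_append, pvGoRev,
      PySem.List.enumerate_append, List.filter_append, List.length_append,
      List.length_singleton]
    by_cases h : PySem.Chars.isdigit c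
    · simp [PySem.List.enumerate_cons, PySem.List.enumerate_nil, h,
        List.getLast?_append, show s + (↑ds.length + 1) - 1 = s + ↑ds.length by omega]
    · simp only [PySem.List.enumerate_cons, PySem.List.enumerate_nil, List.filter_cons, h]
      have := ih s
      simpa [show s + (↑ds.length + 1) - 1 = s + ↑ds.length by omega] using this

-- ===== VERDICT (by name: the statement is the Claim_ definition above) =====
theorem getDigitCharFromString_spec : Claim_equal_getDigitCharFromString := by
  intro str mode _
  unfold Spec_getDigitCharFromString getDigitCharFromString getDigitCharFromString_alt
  have h1 := pvGoFwd_eq str.toList 0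
  have h2 := pvGoRev_eq str.toList 0
  simp only [show (0:Int) - 1 = -1 from rfl, zero_add] at h1 h2
  by_cases hm : mode == "first"
  · rw [if_pos hm]
    cases hfc : (PySem.List.enumerate str.toList 0).filter (fun p => PySem.Chars.isdigit p.2) with
    | nil => rw [hfc] at h1; simp [h1]
    | cons p t =>
      rw [hfc] at h1
      simp [h1, hm]
  · rw [if_neg hm]
    by_cases hfc : (PySem.List.enumerate str.toList 0).filter (fun p => PySem.Chars.isdigit p.2) = []
    · rw [hfc] at h2; simp at h2; simp [h2, hfc]
    · rw [List.getLast?_eq_some_getLast hfc] at h2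
      have hne : ((PySem.List.enumerate str.toList 0).filter
          (fun p => PySem.Chars.isdigit p.2)).map (fun p => (String.ofList [p.2], p.1)) ≠ [] := by
        simpa using hfc
      rw [h2, dif_neg hne, if_neg hm, List.getLast_map]
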